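-- pv_equiv track=rewrite | github.com/RAM1R0-STR/python-practice-exercises | 2do_examen/encrypt_word.py | letra
-- ===== SOURCE A (Python) =====
-- def letra(p):
--     abcd=["A","B","C","D","E","F","G","H","I","J","K","L","M","N","O","P","Q","R","S","T","U","V","W","X","Y","Z"]
--     c = 1
--     for u in abcd:
--         if c == p:
--             return u
--             break
--         c = c + 1
-- ===== SOURCE B (Python) =====
-- def letra(p):
--     # closed form: p-th uppercase letter, or None if p is outside 1..26
--     if 1 <= p <= 26:
--         return chr(64 + p)
--     return None
-- ===== Notes on version B (the rewrite author's own statement) =====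
-- stated objective: idiomatic
-- what changed: B replaces the linear scan over a 26-letter list with a bounds check and a closed-form chr(64+p).
import Mathlib
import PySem

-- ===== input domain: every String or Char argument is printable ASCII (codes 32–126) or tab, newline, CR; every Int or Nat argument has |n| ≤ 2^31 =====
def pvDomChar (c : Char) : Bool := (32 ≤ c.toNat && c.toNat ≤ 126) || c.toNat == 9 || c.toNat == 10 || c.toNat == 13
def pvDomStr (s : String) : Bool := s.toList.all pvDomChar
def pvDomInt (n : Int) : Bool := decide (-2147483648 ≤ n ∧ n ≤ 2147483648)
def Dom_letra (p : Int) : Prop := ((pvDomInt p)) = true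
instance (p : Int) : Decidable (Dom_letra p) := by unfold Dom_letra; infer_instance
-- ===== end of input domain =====

-- B computes the letter in closed form (bounds check + chr(64+p)) instead of A's linear scan; idiomatic.

-- ===== PORT A =====
-- A's loop over the letter list with counter c, transliterated as structural recursion
def letraLoop (xs : List String) (c : Int) (p : Int) : Option String :=
  match xs with
  | [] => none
  | u :: rest => if c == p then some u else letraLoop rest (c + 1) p

def letra (p : Int) : Option String :=
  letraLoop ["A","B","C","D","E","F","G","H","I","J","K","L","M","N","O","P","Q","R","S","T","U","V","W","X","Y","Z"] 1 p

-- ===== PORT B =====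
def letra_alt (p : Int) : Option String :=
  if 1 ≤ p ∧ p ≤ 26 then some (String.mk [Char.ofNat (64 + p).toNat]) else none

-- ===== PRECONDITION & SPEC =====
def Spec_letra (p : Int) (out : Option String) : Prop := out = letra_alt p
instance (p : Int) (out : Option String) : Decidable (Spec_letra p out) := by unfold Spec_letra; infer_instance

-- ===== CLAIM (what is proved, stated in full; the proofs are below) =====
def Claim_equal_letra : Prop := ∀ (p : Int), Dom_letra p → Spec_letra p (letra p)

-- ===== LEMMAS AND PROOFS =====
theorem letraLoop_none (xs : List String) (c p : Int) (h : p < c ∨ c + xs.length ≤ p) :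
    letraLoop xs c p = none := by
  induction xs generalizing c with
  | nil => rfl
  | cons u rest ih =>
    simp only [letraLoop]
    rw [if_neg]
    · exact ih (c + 1) (by simp at h ⊢; omega)
    · simp at h ⊢; omega

-- ===== VERDICT (by name: the statement is the Claim_ definition above) =====
theorem letra_spec : Claim_equal_letra := by
  intro p _
  unfold Spec_letra
  by_cases h : 1 ≤ p ∧ p ≤ 26
  · obtain ⟨h1, h2⟩ := h
    interval_cases p <;> decide
  · rw [letra, letraLoop_none, letra_alt, if_neg h]
    simp only [List.length]
    omega
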